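-- pv_equiv track=rewrite | github.com/clarkbab/medical-imaging | mymi/plotting/dataset/nrrd.py | __reduce_region_diffs
-- ===== SOURCE A (Python) =====
-- from typing import Dict, List, Literal, Optional, Union
--
-- def __reduce_region_diffs(diffs: List[int]) -> int:
--     n_pos = 0
--     n_neg = 0
--     for diff in diffs:
--         if diff == -1:
--             n_neg += 1
--         elif diff == 1:
--             n_pos += 1
--     if n_pos == 0:
--         if n_neg >= 1:
--             return -1 # If one or more regions have neg diffs, show neg diff.
--     elif n_neg == 0:
--         if n_pos >= 1:
--             return 1 # If one or more regions have pos diffs, show pos diff.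
--
--     # If no pos/neg diffs, or conflicting diffs, show nothing.
--     return 0
-- ===== SOURCE B (Python) =====
-- from typing import List
--
-- def __reduce_region_diffs(diffs: List[int]) -> int:
--     # Only the presence of 1 and -1 matters, not counts.
--     return (1 in diffs) - (-1 in diffs)
-- ===== Notes on version B (the rewrite author's own statement) =====
-- stated objective: simpler
-- what changed: Replaced the counting loop and branch ladder with two membership tests and the closed form (1 in diffs) - (-1 in diffs).
import Mathlib
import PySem

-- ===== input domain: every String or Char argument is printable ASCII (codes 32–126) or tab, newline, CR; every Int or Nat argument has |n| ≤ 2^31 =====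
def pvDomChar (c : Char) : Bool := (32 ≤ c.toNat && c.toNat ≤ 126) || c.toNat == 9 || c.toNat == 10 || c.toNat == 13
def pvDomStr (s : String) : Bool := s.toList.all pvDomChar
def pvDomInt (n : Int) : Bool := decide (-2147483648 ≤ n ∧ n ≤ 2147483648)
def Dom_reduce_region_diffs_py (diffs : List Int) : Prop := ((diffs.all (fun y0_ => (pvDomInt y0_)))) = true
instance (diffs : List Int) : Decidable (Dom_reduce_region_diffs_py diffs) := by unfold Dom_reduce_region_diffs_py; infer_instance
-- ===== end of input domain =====

-- ===== PORT A =====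
-- Literal port of A: fold accumulating (n_pos, n_neg), then the branch ladder.
def reduce_region_diffs_py (diffs : List Int) : Int :=
  let counts := diffs.foldl (fun (acc : Int × Int) diff =>
    if diff = -1 then (acc.1, acc.2 + 1)
    else if diff = 1 then (acc.1 + 1, acc.2)
    else acc) (0, 0)
  let n_pos := counts.1
  let n_neg := counts.2
  if n_pos = 0 then
    if n_neg ≥ 1 then -1 else 0
  else if n_neg = 0 then
    if n_pos ≥ 1 then 1 else 0
  else 0

-- ===== PORT B =====
-- Port of B: membership tests, closed form (1 in diffs) - (-1 in diffs).
def reduce_region_diffs_py_alt (diffs : List Int) : Int :=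
  (if (1 : Int) ∈ diffs then 1 else 0) - (if (-1 : Int) ∈ diffs then 1 else 0)

-- ===== PRECONDITION & SPEC =====
def Spec_reduce_region_diffs_py (diffs : List Int) (out : Int) : Prop := out = reduce_region_diffs_py_alt diffs
instance (diffs : List Int) (out : Int) : Decidable (Spec_reduce_region_diffs_py diffs out) := by unfold Spec_reduce_region_diffs_py; infer_instance

-- ===== CLAIM (what is proved, stated in full; the proofs are below) =====
def Claim_equal_reduce_region_diffs_py : Prop := ∀ (diffs : List Int), Dom_reduce_region_diffs_py diffs → Spec_reduce_region_diffs_py diffs (reduce_region_diffs_py diffs)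

-- ===== LEMMAS AND PROOFS =====

lemma foldl_counts (diffs : List Int) (a b : Int) :
    diffs.foldl (fun (acc : Int × Int) diff =>
      if diff = -1 then (acc.1, acc.2 + 1)
      else if diff = 1 then (acc.1 + 1, acc.2)
      else acc) (a, b)
    = (a + diffs.count 1, b + diffs.count (-1)) := by
  induction diffs generalizing a b with
  | nil => simp
  | cons x xs ih =>
    simp only [List.foldl_cons, List.count_cons]
    by_cases h1 : x = -1
    · subst h1
      rw [ih]; push_cast; ring_nf; norm_num [add_comm, add_assoc, add_left_comm]
    · by_cases h2 : x = 1
      · subst h2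
        rw [if_neg (by norm_num), if_pos rfl, ih]; push_cast; norm_num; ring
      · rw [if_neg h1, if_neg h2, ih]
        simp [h1, h2, beq_iff_eq]

lemma count_pos_iff_mem (diffs : List Int) (v : Int) :
    (0 < diffs.count v) ↔ v ∈ diffs := List.count_pos_iff

lemma reduce_eq (diffs : List Int) :
    reduce_region_diffs_py diffs = reduce_region_diffs_py_alt diffs := by
  unfold reduce_region_diffs_py reduce_region_diffs_py_alt
  rw [foldl_counts]
  simp only [zero_add]
  have hp := count_pos_iff_mem diffs 1
  have hn := count_pos_iff_mem diffs (-1)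
  by_cases h1 : (1 : Int) ∈ diffs <;> by_cases h2 : (-1 : Int) ∈ diffs <;>
    simp only [h1, h2, iff_true, iff_false, not_lt, Nat.le_zero] at hp hn <;>
    split_ifs <;> omega

-- ===== VERDICT (by name: the statement is the Claim_ definition above) =====
theorem reduce_region_diffs_py_spec : Claim_equal_reduce_region_diffs_py := by
  intro diffs _
  unfold Spec_reduce_region_diffs_py
  exact reduce_eq diffs
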